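-- pv_equiv track=rewrite | github.com/patpij2/Logia-Competition-All-Solutions | logia 18/3/neonmoj.py | neon
-- ===== SOURCE A (Python) =====
-- def neon(tab):
--     maks = 0
--     for x1 in range(len(tab[0])):
--         for y1 in range(len(tab[0])):
--             for x2 in range(len(tab[0])-x1):
--                 for y2 in range(len(tab[0])-y1):
--                     odleglosc = abs(x1-x2)+abs(y1-y2)
--                     maks = max(tab[x1][y1]+tab[x2][y2]+(odleglosc*2), maks)
--     return maks
-- ===== SOURCE B (Python) =====
-- def neon(tab):
--     n = len(tab[0])
--     best = 0
--     for sx in (1, -1):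
--         for sy in (1, -1):
--             # rows[x][y] = max of tab[u][v] - 2*sx*u - 2*sy*v over u <= x, v <= y
--             rows = []
--             prev = None
--             for x in range(n):
--                 vals = [tab[x][y] - 2 * sx * x - 2 * sy * y for y in range(n)]
--                 if prev is not None:
--                     vals = [max(v, p) for v, p in zip(vals, prev)]
--                 row = []
--                 run = None
--                 for v in vals:
--                     run = v if run is None else max(v, run)
--                     row.append(run)
--                 rows.append(row)
--                 prev = row
--             for x1 in range(n):
--                 for y1 in range(n):
--                     best = max(best, tab[x1][y1] + 2 * sx * x1 + 2 * sy * y1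
--                                + rows[n - 1 - x1][n - 1 - y1])
--     return best
-- ===== Notes on version B (the rewrite author's own statement) =====
-- stated objective: faster
-- what changed: Replaces the brute-force scan over all index quadruples (x1,y1,x2,y2) by the standard Manhattan-distance trick: for each of the 4 sign combinations build a 2D prefix-maximum table of tab[x][y]-2*sx*x-2*sy*y and combine it with tab[x1][y1]+2*sx*x1+2*sy*y1 in a single O(n^2) scan.
import Mathlib
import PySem

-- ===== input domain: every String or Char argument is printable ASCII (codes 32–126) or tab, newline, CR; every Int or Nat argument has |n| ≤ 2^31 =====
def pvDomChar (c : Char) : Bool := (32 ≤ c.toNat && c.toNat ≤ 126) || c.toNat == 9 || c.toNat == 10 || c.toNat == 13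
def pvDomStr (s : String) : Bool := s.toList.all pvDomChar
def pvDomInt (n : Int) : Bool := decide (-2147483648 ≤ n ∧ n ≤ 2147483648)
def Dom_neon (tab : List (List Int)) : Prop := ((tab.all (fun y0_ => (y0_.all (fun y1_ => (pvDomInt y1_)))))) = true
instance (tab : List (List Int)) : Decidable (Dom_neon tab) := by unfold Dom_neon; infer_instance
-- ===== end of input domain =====

-- B replaces A's O(n^4) scan over all index quadruples by the standard 4-sign-combination
-- decomposition of the Manhattan distance with a 2D prefix-maximum table (O(n^2)); objective: faster.

-- tab[x][y]; exact whenever both indices are in range (Pre_neon guarantees that for every access)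
def cell (tab : List (List Int)) (x y : Nat) : Int := (tab.getD x []).getD y 0

-- ===== PORT A =====
def neon (tab : List (List Int)) : Int :=
  let n := (tab.headD []).length
  (List.range n).foldl (fun (maks : Int) (x1 : Nat) =>
    (List.range n).foldl (fun (maks : Int) (y1 : Nat) =>
      (List.range (n - x1)).foldl (fun (maks : Int) (x2 : Nat) =>
        (List.range (n - y1)).foldl (fun (maks : Int) (y2 : Nat) =>
          let odleglosc : Int := |(x1 : Int) - (x2 : Int)| + |(y1 : Int) - (y2 : Int)|
          max (cell tab x1 y1 + cell tab x2 y2 + odleglosc * 2) maks) maks) maks) maks) 0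

-- ===== PORT B =====
-- running maximum of a list, seeded with an optional accumulator (the `run` variable of Source B)
def runMax (acc : Option Int) : List Int → List Int
  | [] => []
  | v :: t =>
      let w := match acc with | none => v | some r => max v r
      w :: runMax (some w) t

-- body of Source B's `for sy` loop: build the prefix-max table for one sign combination, then scan
def combo (tab : List (List Int)) (n : Nat) (sx sy best : Int) : Int :=
  let st := (List.range n).foldl (fun (st : List (List Int) × Option (List Int)) x =>
      let vals := (List.range n).map (fun y => cell tab x y - 2 * sx * (x : Int) - 2 * sy * (y : Int))
      let vals := match st.2 with
        | none => vals
        | some prev => List.zipWith max vals prev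
      let row := runMax none vals
      (st.1 ++ [row], some row)) ([], none)
  let rows := st.1
  (List.range n).foldl (fun best x1 =>
    (List.range n).foldl (fun best y1 =>
      max best (cell tab x1 y1 + 2 * sx * (x1 : Int) + 2 * sy * (y1 : Int) +
        ((rows.getD (n - 1 - x1) []).getD (n - 1 - y1) 0))) best) best

def neon_alt (tab : List (List Int)) : Int :=
  let n := (tab.headD []).length
  [(1 : Int), -1].foldl (fun best sx =>
    [(1 : Int), -1].foldl (fun best sy => combo tab n sx sy best) best) 0

-- ===== PRECONDITION & SPEC =====
-- Pre_neon: exactly the inputs where Python A returns: tab is nonempty and every cell of the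
-- n×n block (n = len(tab[0])) exists; otherwise A raises IndexError.
def Pre_neon (tab : List (List Int)) : Prop :=
  tab ≠ [] ∧ (tab.headD []).length ≤ tab.length ∧
    ∀ r ∈ tab.take (tab.headD []).length, (tab.headD []).length ≤ r.length
instance (tab : List (List Int)) : Decidable (Pre_neon tab) := by unfold Pre_neon; infer_instance

def pvWitness_neon : List (List Int) := [[1, 2], [3, 4]]

def Spec_neon (tab : List (List Int)) (out : Int) : Prop := out = neon_alt tab
instance (tab : List (List Int)) (out : Int) : Decidable (Spec_neon tab out) := by unfold Spec_neon; infer_instance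

-- ===== CLAIM (what is proved, stated in full; the proofs are below) =====
def Claim_equal_neon : Prop := ∀ (tab : List (List Int)), Dom_neon tab → Pre_neon tab → Spec_neon tab (neon tab)

-- ===== LEMMAS AND PROOFS =====

-- generic foldl-max toolkit
theorem pvFoldl_ge {α : Type} (f : Int → α → Int) (h : ∀ b x, b ≤ f b x) :
    ∀ (l : List α) (b : Int), b ≤ List.foldl f b l := by
  intro l
  induction l with
  | nil => intro b; simp
  | cons x t ih => intro b; exact le_trans (h b x) (ih (f b x))

theorem pvLe_foldl_of_mem {α : Type} (f : Int → α → Int) (h : ∀ b x, b ≤ f b x) (c : Int) (x : α) :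
    ∀ (l : List α) (b : Int), x ∈ l → (∀ b, c ≤ f b x) → c ≤ List.foldl f b l := by
  intro l
  induction l with
  | nil => intro b hx; simp at hx
  | cons y t ih =>
      intro b hx hc
      rcases List.mem_cons.mp hx with h1 | h1
      · subst h1; exact le_trans (hc b) (pvFoldl_ge f h t (f b x))
      · exact ih (f b y) h1 hc

theorem pvFoldl_cases {α : Type} (f : Int → α → Int) (P : Int → Prop) :
    ∀ (l : List α) (b : Int), (∀ b x, x ∈ l → f b x = b ∨ P (f b x)) →
      List.foldl f b l = b ∨ P (List.foldl f b l) := by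
  intro l
  induction l with
  | nil => intro b _; simp
  | cons x t ih =>
      intro b h
      have ht : ∀ b y, y ∈ t → f b y = b ∨ P (f b y) := fun b y hy => h b y (List.mem_cons_of_mem _ hy)
      rcases ih (f b x) ht with h1 | h1
      · rcases h b x (List.mem_cons_self) with h2 | h2
        · left; simpa [h2] using h1
        · right; simpa [h1] using h2
      · right; exact h1

theorem pvFoldl_congr_mem {α : Type} (f g : Int → α → Int) :
    ∀ (l : List α) (b : Int), (∀ b x, x ∈ l → f b x = g b x) →
      List.foldl f b l = List.foldl g b l := by
  intro l
  induction l with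
  | nil => intro b _; rfl
  | cons x t ih =>
      intro b h
      simp only [List.foldl_cons]
      rw [h b x (List.mem_cons_self)]
      exact ih (g b x) (fun b y hy => h b y (List.mem_cons_of_mem _ hy))

-- runMax facts
theorem runMax_length : ∀ (l : List Int) (acc : Option Int), (runMax acc l).length = l.length := by
  intro l
  induction l with
  | nil => intro acc; rfl
  | cons v t ih => intro acc; simp [runMax, ih]

theorem runMax_some_spec : ∀ (t : List Int) (a : Int) (j : Nat), j < t.length →
    a ≤ (runMax (some a) t).getD j 0 ∧
    (∀ y, y ≤ j → t.getD y 0 ≤ (runMax (some a) t).getD j 0) ∧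
    ((runMax (some a) t).getD j 0 = a ∨ ∃ y, y ≤ j ∧ (runMax (some a) t).getD j 0 = t.getD y 0) := by
  intro t
  induction t with
  | nil => intro a j hj; simp at hj
  | cons v t ih =>
      intro a j hj
      have hr : runMax (some a) (v :: t) = max v a :: runMax (some (max v a)) t := rfl
      cases j with
      | zero =>
          rw [hr]
          refine ⟨le_max_right _ _, ?_, ?_⟩
          · intro y hy; interval_cases y; simp
          · rcases max_cases v a with ⟨h1, _⟩ | ⟨h1, _⟩
            · right; exact ⟨0, le_refl _, by simp [h1]⟩
            · left; simp [h1]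
      | succ j =>
          have hj' : j < t.length := by simpa using hj
          obtain ⟨ih1, ih2, ih3⟩ := ih (max v a) j hj'
          have hg : (runMax (some a) (v :: t)).getD (j + 1) 0 =
              (runMax (some (max v a)) t).getD j 0 := by rw [hr]; simp
          refine ⟨?_, ?_, ?_⟩
          · rw [hg]; exact le_trans (le_max_right v a) ih1
          · intro y hy
            cases y with
            | zero => rw [hg]; simpa using le_trans (le_max_left v a) ih1
            | succ y =>
                rw [hg]; simpa using ih2 y (Nat.succ_le_succ_iff.mp hy)
          · rw [hg]
            rcases ih3 with h | ⟨y, hy, he⟩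
            · rcases max_cases v a with ⟨h1, _⟩ | ⟨h1, _⟩
              · right; exact ⟨0, Nat.zero_le _, by rw [h, h1]; simp⟩
              · left; rw [h, h1]
            · right; exact ⟨y + 1, Nat.succ_le_succ hy, by rw [he]; simp⟩

theorem runMax_none_bound (l : List Int) (j : Nat) (hj : j < l.length) :
    ∀ y, y ≤ j → l.getD y 0 ≤ (runMax none l).getD j 0 := by
  cases l with
  | nil => simp at hj
  | cons v t =>
      have hr : runMax (none : Option Int) (v :: t) = v :: runMax (some v) t := rfl
      cases j with
      | zero =>
          intro y hy; interval_cases y; rw [hr]; simp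
      | succ j =>
          have hj' : j < t.length := by simpa using hj
          obtain ⟨ih1, ih2, _⟩ := runMax_some_spec t v j hj'
          intro y hy
          have hg : (runMax none (v :: t)).getD (j + 1) 0 =
              (runMax (some v) t).getD j 0 := by rw [hr]; simp
          cases y with
          | zero => rw [hg]; simpa using ih1
          | succ y => rw [hg]; simpa using ih2 y (Nat.succ_le_succ_iff.mp hy)

theorem runMax_none_attain (l : List Int) (j : Nat) (hj : j < l.length) :
    ∃ y, y ≤ j ∧ (runMax none l).getD j 0 = l.getD y 0 := by
  cases l with
  | nil => simp at hj
  | cons v t =>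
      have hr : runMax (none : Option Int) (v :: t) = v :: runMax (some v) t := rfl
      cases j with
      | zero => exact ⟨0, le_refl _, by rw [hr]; simp⟩
      | succ j =>
          have hj' : j < t.length := by simpa using hj
          obtain ⟨_, _, ih3⟩ := runMax_some_spec t v j hj'
          have hg : (runMax none (v :: t)).getD (j + 1) 0 =
              (runMax (some v) t).getD j 0 := by rw [hr]; simp
          rcases ih3 with h | ⟨y, hy, he⟩
          · exact ⟨0, Nat.zero_le _, by rw [hg, h]; simp⟩
          · exact ⟨y + 1, Nat.succ_le_succ hy, by rw [hg, he]; simp⟩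

-- proof-side descriptions of the table B builds
def fval (tab : List (List Int)) (sx sy : Int) (x y : Nat) : Int :=
  cell tab x y - 2 * sx * (x : Int) - 2 * sy * (y : Int)

def hval (tab : List (List Int)) (sx sy : Int) (x y : Nat) : Int :=
  cell tab x y + 2 * sx * (x : Int) + 2 * sy * (y : Int)

def valsAt (tab : List (List Int)) (sx sy : Int) (n x : Nat) : List Int :=
  (List.range n).map (fun y => fval tab sx sy x y)

def rowAt (tab : List (List Int)) (sx sy : Int) (n : Nat) : Nat → List Int
  | 0 => runMax none (valsAt tab sx sy n 0)
  | (i + 1) => runMax none (List.zipWith max (valsAt tab sx sy n (i + 1)) (rowAt tab sx sy n i))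

def Tterm (tab : List (List Int)) (sx sy : Int) (n x1 y1 : Nat) : Int :=
  cell tab x1 y1 + 2 * sx * (x1 : Int) + 2 * sy * (y1 : Int) +
    ((rowAt tab sx sy n (n - 1 - x1)).getD (n - 1 - y1) 0)

def qval (tab : List (List Int)) (x1 y1 x2 y2 : Nat) : Int :=
  cell tab x1 y1 + cell tab x2 y2 + (|(x1 : Int) - (x2 : Int)| + |(y1 : Int) - (y2 : Int)|) * 2

theorem valsAt_length (tab : List (List Int)) (sx sy : Int) (n x : Nat) :
    (valsAt tab sx sy n x).length = n := by simp [valsAt]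

theorem valsAt_getD (tab : List (List Int)) (sx sy : Int) (n x y : Nat) (hy : y < n) :
    (valsAt tab sx sy n x).getD y 0 = fval tab sx sy x y := by
  rw [List.getD_eq_getElem?_getD]
  simp [valsAt, hy]

theorem rowAt_length (tab : List (List Int)) (sx sy : Int) (n : Nat) :
    ∀ i, (rowAt tab sx sy n i).length = n := by
  intro i
  induction i with
  | zero => simp [rowAt, runMax_length, valsAt_length]
  | succ i ih => simp [rowAt, runMax_length, valsAt_length, ih]

theorem zipWith_max_getD (l1 l2 : List Int) (y : Nat) (h1 : y < l1.length) (h2 : y < l2.length) :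
    (List.zipWith max l1 l2).getD y 0 = max (l1.getD y 0) (l2.getD y 0) := by
  have hy : y < (List.zipWith max l1 l2).length := by simp [List.length_zipWith]; omega
  rw [List.getD_eq_getElem _ _ hy, List.getD_eq_getElem _ _ h1, List.getD_eq_getElem _ _ h2]
  simp

theorem rowAt_bound (tab : List (List Int)) (sx sy : Int) (n : Nat) :
    ∀ i j x y, i < n → j < n → x ≤ i → y ≤ j →
      fval tab sx sy x y ≤ (rowAt tab sx sy n i).getD j 0 := by
  intro i
  induction i with
  | zero =>
      intro j x y hi hj hx hy
      interval_cases x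
      have hb := runMax_none_bound (valsAt tab sx sy n 0) j
        (by rw [valsAt_length]; exact hj) y hy
      rw [valsAt_getD tab sx sy n 0 y (lt_of_le_of_lt hy hj)] at hb
      simpa [rowAt] using hb
  | succ i ih =>
      intro j x y hi hj hx hy
      have hyn : y < n := lt_of_le_of_lt hy hj
      have hzlen : j < (List.zipWith max (valsAt tab sx sy n (i + 1)) (rowAt tab sx sy n i)).length := by
        simp [List.length_zipWith, valsAt_length, rowAt_length]; omega
      have hb := runMax_none_bound _ j hzlen y hy
      have hz : (List.zipWith max (valsAt tab sx sy n (i + 1)) (rowAt tab sx sy n i)).getD y 0 =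
          max ((valsAt tab sx sy n (i + 1)).getD y 0) ((rowAt tab sx sy n i).getD y 0) := by
        apply zipWith_max_getD <;> simp [valsAt_length, rowAt_length] <;> omega
      rw [hz] at hb
      rcases Nat.lt_or_ge x (i + 1) with hx' | hx'
      · have h1 : fval tab sx sy x y ≤ (rowAt tab sx sy n i).getD y 0 :=
          ih y x y (Nat.lt_of_succ_lt hi) hyn (Nat.le_of_lt_succ hx') (le_refl _)
        calc fval tab sx sy x y ≤ _ := le_trans h1 (le_trans (le_max_right _ _) hb)
          _ = (rowAt tab sx sy n (i + 1)).getD j 0 := by simp [rowAt]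
      · have hxe : x = i + 1 := le_antisymm hx hx'
        subst hxe
        have h1 : fval tab sx sy (i + 1) y ≤ (valsAt tab sx sy n (i + 1)).getD y 0 := by
          rw [valsAt_getD tab sx sy n (i + 1) y hyn]
        calc fval tab sx sy (i + 1) y ≤ _ := le_trans h1 (le_trans (le_max_left _ _) hb)
          _ = (rowAt tab sx sy n (i + 1)).getD j 0 := by simp [rowAt]

theorem rowAt_attain (tab : List (List Int)) (sx sy : Int) (n : Nat) :
    ∀ i j, i < n → j < n →
      ∃ x y, x ≤ i ∧ y ≤ j ∧ (rowAt tab sx sy n i).getD j 0 = fval tab sx sy x y := by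
  intro i
  induction i with
  | zero =>
      intro j hi hj
      rcases runMax_none_attain (valsAt tab sx sy n 0) j (by rw [valsAt_length]; exact hj) with
        ⟨y, hy, he⟩
      exact ⟨0, y, le_refl _, hy, by
        rw [show rowAt tab sx sy n 0 = runMax none (valsAt tab sx sy n 0) from rfl, he,
          valsAt_getD tab sx sy n 0 y (lt_of_le_of_lt hy hj)]⟩
  | succ i ih =>
      intro j hi hj
      have hzlen : j < (List.zipWith max (valsAt tab sx sy n (i + 1)) (rowAt tab sx sy n i)).length := by
        simp [List.length_zipWith, valsAt_length, rowAt_length]; omega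
      obtain ⟨y, hy, he⟩ := runMax_none_attain _ j hzlen
      have hyn : y < n := lt_of_le_of_lt hy hj
      have hz : (List.zipWith max (valsAt tab sx sy n (i + 1)) (rowAt tab sx sy n i)).getD y 0 =
          max ((valsAt tab sx sy n (i + 1)).getD y 0) ((rowAt tab sx sy n i).getD y 0) := by
        apply zipWith_max_getD <;> simp [valsAt_length, rowAt_length] <;> omega
      have he' : (rowAt tab sx sy n (i + 1)).getD j 0 =
          max ((valsAt tab sx sy n (i + 1)).getD y 0) ((rowAt tab sx sy n i).getD y 0) := by
        rw [show rowAt tab sx sy n (i + 1) =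
          runMax none (List.zipWith max (valsAt tab sx sy n (i + 1)) (rowAt tab sx sy n i)) from rfl,
          he, hz]
      rcases max_cases ((valsAt tab sx sy n (i + 1)).getD y 0) ((rowAt tab sx sy n i).getD y 0) with
        ⟨h1, _⟩ | ⟨h1, _⟩
      · refine ⟨i + 1, y, le_refl _, hy, ?_⟩
        rw [he', h1, valsAt_getD tab sx sy n (i + 1) y hyn]
      · rcases ih y (Nat.lt_of_succ_lt hi) hyn with ⟨x', y', hx', hy', he''⟩
        refine ⟨x', y', Nat.le_succ_of_le hx', le_trans hy' hy, ?_⟩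
        rw [he', h1, he'']

-- the fold state of combo equals the rowAt description
theorem rows_state (tab : List (List Int)) (sx sy : Int) (n : Nat) :
    ∀ k, (List.range k).foldl (fun (st : List (List Int) × Option (List Int)) x =>
        let vals := (List.range n).map (fun y => cell tab x y - 2 * sx * (x : Int) - 2 * sy * (y : Int))
        let vals := match st.2 with
          | none => vals
          | some prev => List.zipWith max vals prev
        let row := runMax none vals
        (st.1 ++ [row], some row)) ([], none) =
      ((List.range k).map (rowAt tab sx sy n),
        match k with | 0 => none | (j + 1) => some (rowAt tab sx sy n j)) := by
  intro k
  induction k with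
  | zero => rfl
  | succ k ih =>
      rw [List.range_succ, List.foldl_append, ih]
      cases k with
      | zero => simp [rowAt, valsAt, fval]
      | succ j =>
          simp [rowAt, valsAt, fval, List.range_succ]

theorem combo_eq (tab : List (List Int)) (sx sy b : Int) (n : Nat) :
    combo tab n sx sy b = (List.range n).foldl (fun best x1 =>
      (List.range n).foldl (fun best y1 => max best (Tterm tab sx sy n x1 y1)) best) b := by
  unfold combo
  rw [rows_state tab sx sy n n]
  apply pvFoldl_congr_mem
  intro b x1 hx1
  apply pvFoldl_congr_mem
  intro b y1 _
  have hx1n : x1 < n := List.mem_range.mp hx1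
  have hlt : n - 1 - x1 < n := by omega
  have : ((List.range n).map (rowAt tab sx sy n)).getD (n - 1 - x1) [] =
      rowAt tab sx sy n (n - 1 - x1) := by
    rw [List.getD_eq_getElem?_getD]
    simp [hlt]
  rw [this]
  rfl

theorem combo_ge (tab : List (List Int)) (sx sy b : Int) (n : Nat) : b ≤ combo tab n sx sy b := by
  rw [combo_eq]
  apply pvFoldl_ge
  intro b x1
  apply pvFoldl_ge
  intro b y1
  exact le_max_left _ _

theorem combo_bound (tab : List (List Int)) (sx sy b : Int) (n x1 y1 : Nat)
    (hx1 : x1 < n) (hy1 : y1 < n) : Tterm tab sx sy n x1 y1 ≤ combo tab n sx sy b := by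
  rw [combo_eq]
  apply pvLe_foldl_of_mem _ (fun b x => pvFoldl_ge _ (fun b y => le_max_left _ _) _ b) _ x1 _ b
    (List.mem_range.mpr hx1)
  intro b
  apply pvLe_foldl_of_mem _ (fun b y => le_max_left _ _) _ y1 _ b (List.mem_range.mpr hy1)
  intro b
  exact le_max_right _ _

theorem combo_cases (tab : List (List Int)) (sx sy b : Int) (n : Nat) :
    combo tab n sx sy b = b ∨
      ∃ x1 y1, x1 < n ∧ y1 < n ∧ combo tab n sx sy b = Tterm tab sx sy n x1 y1 := by
  rw [combo_eq]
  apply pvFoldl_cases _ (fun r => ∃ x1 y1, x1 < n ∧ y1 < n ∧ r = Tterm tab sx sy n x1 y1)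
  intro b x1 hx1
  rcases pvFoldl_cases (fun best y1 => max best (Tterm tab sx sy n x1 y1))
      (fun r => ∃ y1, y1 < n ∧ r = Tterm tab sx sy n x1 y1) (List.range n) b
      (fun b y1 hy1 => by
        rcases max_cases b (Tterm tab sx sy n x1 y1) with ⟨h1, _⟩ | ⟨h1, _⟩
        · left; exact h1
        · right; exact ⟨y1, List.mem_range.mp hy1, h1⟩) with h | h
  · left; exact h
  · right; rcases h with ⟨y1, hy1, he⟩; exact ⟨x1, y1, List.mem_range.mp hx1, hy1, he⟩

-- arithmetic: the sign decomposition of qval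
theorem hf_le_qval (tab : List (List Int)) (sx sy : Int) (x1 y1 x2 y2 : Nat)
    (hsx : sx = 1 ∨ sx = -1) (hsy : sy = 1 ∨ sy = -1) :
    hval tab sx sy x1 y1 + fval tab sx sy x2 y2 ≤ qval tab x1 y1 x2 y2 := by
  unfold hval fval qval
  rcases abs_cases ((x1 : Int) - (x2 : Int)) with ⟨h1, _⟩ | ⟨h1, _⟩ <;>
    rcases abs_cases ((y1 : Int) - (y2 : Int)) with ⟨h2, _⟩ | ⟨h2, _⟩ <;>
    rcases hsx with hx | hx <;> rcases hsy with hy | hy <;> subst hx <;> subst hy <;>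
    rw [h1, h2] <;> ring_nf <;> omega

theorem abs_sign (a b : Nat) :
    ∃ s : Int, (s = 1 ∨ s = -1) ∧ |(a : Int) - (b : Int)| = s * ((a : Int) - (b : Int)) := by
  by_cases h : (b : Int) ≤ (a : Int)
  · exact ⟨1, Or.inl rfl, by rw [abs_of_nonneg (by omega)]; ring⟩
  · exact ⟨-1, Or.inr rfl, by rw [abs_of_nonpos (by omega)]; ring⟩

theorem qval_split (tab : List (List Int)) (x1 y1 x2 y2 : Nat) :
    ∃ sx sy : Int, (sx = 1 ∨ sx = -1) ∧ (sy = 1 ∨ sy = -1) ∧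
      qval tab x1 y1 x2 y2 = hval tab sx sy x1 y1 + fval tab sx sy x2 y2 := by
  rcases abs_sign x1 x2 with ⟨sx, hsx, hx⟩
  rcases abs_sign y1 y2 with ⟨sy, hsy, hy⟩
  refine ⟨sx, sy, hsx, hsy, ?_⟩
  unfold qval hval fval
  rw [hx, hy]; ring

-- neon_alt as four chained combos
theorem neon_alt_eq (tab : List (List Int)) :
    neon_alt tab = combo tab (tab.headD []).length (-1) (-1)
      (combo tab (tab.headD []).length (-1) 1
        (combo tab (tab.headD []).length 1 (-1)
          (combo tab (tab.headD []).length 1 1 0))) := by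
  rfl

theorem neon_alt_ge_zero (tab : List (List Int)) : 0 ≤ neon_alt tab := by
  rw [neon_alt_eq]
  exact le_trans (combo_ge tab 1 1 0 _) (le_trans (combo_ge tab 1 (-1) _ _)
    (le_trans (combo_ge tab (-1) 1 _ _) (combo_ge tab (-1) (-1) _ _)))

theorem combo_le_neon_alt (tab : List (List Int)) (sx sy : Int) (n : Nat)
    (hn : n = (tab.headD []).length) (hsx : sx = 1 ∨ sx = -1) (hsy : sy = 1 ∨ sy = -1)
    (x1 y1 : Nat) (hx1 : x1 < n) (hy1 : y1 < n) :
    Tterm tab sx sy n x1 y1 ≤ neon_alt tab := by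
  subst hn
  rw [neon_alt_eq]
  rcases hsx with hx | hx <;> rcases hsy with hy | hy <;> subst hx <;> subst hy
  · exact le_trans (combo_bound tab 1 1 0 _ x1 y1 hx1 hy1)
      (le_trans (combo_ge tab 1 (-1) _ _) (le_trans (combo_ge tab (-1) 1 _ _)
        (combo_ge tab (-1) (-1) _ _)))
  · exact le_trans (combo_bound tab 1 (-1) _ _ x1 y1 hx1 hy1)
      (le_trans (combo_ge tab (-1) 1 _ _) (combo_ge tab (-1) (-1) _ _))
  · exact le_trans (combo_bound tab (-1) 1 _ _ x1 y1 hx1 hy1) (combo_ge tab (-1) (-1) _ _)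
  · exact le_of_eq rfl |>.trans (combo_bound tab (-1) (-1) _ _ x1 y1 hx1 hy1)

theorem neon_alt_cases (tab : List (List Int)) :
    neon_alt tab = 0 ∨ ∃ sx sy : Int, ∃ x1 y1 : Nat, (sx = 1 ∨ sx = -1) ∧ (sy = 1 ∨ sy = -1) ∧
      x1 < (tab.headD []).length ∧ y1 < (tab.headD []).length ∧
      neon_alt tab = Tterm tab sx sy (tab.headD []).length x1 y1 := by
  rw [neon_alt_eq]
  set n := (tab.headD []).length
  rcases combo_cases tab (-1) (-1)
      (combo tab n (-1) 1 (combo tab n 1 (-1) (combo tab n 1 1 0))) n with h4 | h4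
  · rw [h4]
    rcases combo_cases tab (-1) 1 (combo tab n 1 (-1) (combo tab n 1 1 0)) n with h3 | h3
    · rw [h3]
      rcases combo_cases tab 1 (-1) (combo tab n 1 1 0) n with h2 | h2
      · rw [h2]
        rcases combo_cases tab 1 1 0 n with h1 | h1
        · left; exact h1
        · rcases h1 with ⟨x1, y1, hx1, hy1, he⟩
          right; exact ⟨1, 1, x1, y1, Or.inl rfl, Or.inl rfl, hx1, hy1, he⟩
      · rcases h2 with ⟨x1, y1, hx1, hy1, he⟩
        right; exact ⟨1, -1, x1, y1, Or.inl rfl, Or.inr rfl, hx1, hy1, he⟩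
    · rcases h3 with ⟨x1, y1, hx1, hy1, he⟩
      right; exact ⟨-1, 1, x1, y1, Or.inr rfl, Or.inl rfl, hx1, hy1, he⟩
  · rcases h4 with ⟨x1, y1, hx1, hy1, he⟩
    right; exact ⟨-1, -1, x1, y1, Or.inr rfl, Or.inr rfl, hx1, hy1, he⟩

-- A-side: neon as a nested max fold over qval
theorem neon_eq (tab : List (List Int)) :
    neon tab = (List.range (tab.headD []).length).foldl (fun maks x1 =>
      (List.range (tab.headD []).length).foldl (fun maks y1 =>
        (List.range ((tab.headD []).length - x1)).foldl (fun maks x2 =>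
          (List.range ((tab.headD []).length - y1)).foldl (fun maks y2 =>
            max (qval tab x1 y1 x2 y2) maks) maks) maks) maks) 0 := by
  rfl

theorem neon_ge_zero (tab : List (List Int)) : 0 ≤ neon tab := by
  rw [neon_eq]
  apply pvFoldl_ge; intro b x1
  apply pvFoldl_ge; intro b y1
  apply pvFoldl_ge; intro b x2
  apply pvFoldl_ge; intro b y2
  exact le_max_right _ _

theorem neon_bound (tab : List (List Int)) (x1 y1 x2 y2 : Nat)
    (hx1 : x1 < (tab.headD []).length) (hy1 : y1 < (tab.headD []).length)
    (hx2 : x2 < (tab.headD []).length - x1) (hy2 : y2 < (tab.headD []).length - y1) :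
    qval tab x1 y1 x2 y2 ≤ neon tab := by
  rw [neon_eq]
  set n := (tab.headD []).length
  apply pvLe_foldl_of_mem _ (fun b x => pvFoldl_ge _ (fun b y => pvFoldl_ge _
      (fun b u => pvFoldl_ge _ (fun b v => le_max_right _ _) _ b) _ b) _ b) _ x1 _ 0
    (List.mem_range.mpr hx1)
  intro b
  apply pvLe_foldl_of_mem _ (fun b y => pvFoldl_ge _ (fun b u => pvFoldl_ge _
      (fun b v => le_max_right _ _) _ b) _ b) _ y1 _ b (List.mem_range.mpr hy1)
  intro b
  apply pvLe_foldl_of_mem _ (fun b u => pvFoldl_ge _ (fun b v => le_max_right _ _) _ b) _ x2 _ b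
    (List.mem_range.mpr hx2)
  intro b
  apply pvLe_foldl_of_mem _ (fun b v => le_max_right _ _) _ y2 _ b (List.mem_range.mpr hy2)
  intro b
  exact le_max_left _ _

theorem neon_cases (tab : List (List Int)) :
    neon tab = 0 ∨ ∃ x1 y1 x2 y2 : Nat, x1 < (tab.headD []).length ∧
      y1 < (tab.headD []).length ∧ x2 < (tab.headD []).length - x1 ∧
      y2 < (tab.headD []).length - y1 ∧ neon tab = qval tab x1 y1 x2 y2 := by
  rw [neon_eq]
  set n := (tab.headD []).length
  have L4 : ∀ (x1 y1 x2 : Nat) (b : Int),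
      (List.range (n - y1)).foldl (fun (maks : Int) (y2 : Nat) =>
        max (qval tab x1 y1 x2 y2) maks) b = b ∨
      ∃ y2, y2 < n - y1 ∧ (List.range (n - y1)).foldl (fun (maks : Int) (y2 : Nat) =>
        max (qval tab x1 y1 x2 y2) maks) b = qval tab x1 y1 x2 y2 := by
    intro x1 y1 x2 b
    apply pvFoldl_cases _ (fun r => ∃ y2, y2 < n - y1 ∧ r = qval tab x1 y1 x2 y2)
    intro c y2 hy2
    rcases max_cases (qval tab x1 y1 x2 y2) c with ⟨h1, _⟩ | ⟨h1, _⟩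
    · right; exact ⟨y2, List.mem_range.mp hy2, h1⟩
    · left; exact h1
  have L3 : ∀ (x1 y1 : Nat) (b : Int),
      (List.range (n - x1)).foldl (fun (maks : Int) (x2 : Nat) =>
        (List.range (n - y1)).foldl (fun (maks : Int) (y2 : Nat) =>
          max (qval tab x1 y1 x2 y2) maks) maks) b = b ∨
      ∃ x2 y2, x2 < n - x1 ∧ y2 < n - y1 ∧
        (List.range (n - x1)).foldl (fun (maks : Int) (x2 : Nat) =>
          (List.range (n - y1)).foldl (fun (maks : Int) (y2 : Nat) =>
            max (qval tab x1 y1 x2 y2) maks) maks) b = qval tab x1 y1 x2 y2 := by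
    intro x1 y1 b
    apply pvFoldl_cases _ (fun r => ∃ x2 y2, x2 < n - x1 ∧ y2 < n - y1 ∧
      r = qval tab x1 y1 x2 y2)
    intro c x2 hx2
    rcases L4 x1 y1 x2 c with h | ⟨y2, hy2, he⟩
    · left; exact h
    · right; exact ⟨x2, y2, List.mem_range.mp hx2, hy2, he⟩
  have L2 : ∀ (x1 : Nat) (b : Int),
      (List.range n).foldl (fun (maks : Int) (y1 : Nat) =>
        (List.range (n - x1)).foldl (fun (maks : Int) (x2 : Nat) =>
          (List.range (n - y1)).foldl (fun (maks : Int) (y2 : Nat) =>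
            max (qval tab x1 y1 x2 y2) maks) maks) maks) b = b ∨
      ∃ y1 x2 y2, y1 < n ∧ x2 < n - x1 ∧ y2 < n - y1 ∧
        (List.range n).foldl (fun (maks : Int) (y1 : Nat) =>
          (List.range (n - x1)).foldl (fun (maks : Int) (x2 : Nat) =>
            (List.range (n - y1)).foldl (fun (maks : Int) (y2 : Nat) =>
              max (qval tab x1 y1 x2 y2) maks) maks) maks) b = qval tab x1 y1 x2 y2 := by
    intro x1 b
    apply pvFoldl_cases _ (fun r => ∃ y1 x2 y2, y1 < n ∧ x2 < n - x1 ∧ y2 < n - y1 ∧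
      r = qval tab x1 y1 x2 y2)
    intro c y1 hy1
    rcases L3 x1 y1 c with h | ⟨x2, y2, hx2, hy2, he⟩
    · left; exact h
    · right; exact ⟨y1, x2, y2, List.mem_range.mp hy1, hx2, hy2, he⟩
  apply pvFoldl_cases _ (fun r => ∃ x1 y1 x2 y2 : Nat, x1 < n ∧ y1 < n ∧ x2 < n - x1 ∧
    y2 < n - y1 ∧ r = qval tab x1 y1 x2 y2)
  intro b x1 hx1
  rcases L2 x1 b with h | ⟨y1, x2, y2, hy1, hx2, hy2, he⟩
  · left; exact h
  · right; exact ⟨x1, y1, x2, y2, List.mem_range.mp hx1, hy1, hx2, hy2, he⟩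

theorem neon_le_alt (tab : List (List Int)) : neon tab ≤ neon_alt tab := by
  rcases neon_cases tab with h | ⟨x1, y1, x2, y2, hx1, hy1, hx2, hy2, he⟩
  · rw [h]; exact neon_alt_ge_zero tab
  · rw [he]
    rcases qval_split tab x1 y1 x2 y2 with ⟨sx, sy, hsx, hsy, hq⟩
    rw [hq]
    set n := (tab.headD []).length
    have hf : fval tab sx sy x2 y2 ≤ (rowAt tab sx sy n (n - 1 - x1)).getD (n - 1 - y1) 0 :=
      rowAt_bound tab sx sy n (n - 1 - x1) (n - 1 - y1) x2 y2 (by omega) (by omega)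
        (by omega) (by omega)
    have hT : hval tab sx sy x1 y1 + fval tab sx sy x2 y2 ≤ Tterm tab sx sy n x1 y1 := by
      unfold Tterm hval at *
      omega
    exact le_trans hT (combo_le_neon_alt tab sx sy n rfl hsx hsy x1 y1 hx1 hy1)

theorem alt_le_neon (tab : List (List Int)) : neon_alt tab ≤ neon tab := by
  rcases neon_alt_cases tab with h | ⟨sx, sy, x1, y1, hsx, hsy, hx1, hy1, he⟩
  · rw [h]; exact neon_ge_zero tab
  · rw [he]
    set n := (tab.headD []).length
    rcases rowAt_attain tab sx sy n (n - 1 - x1) (n - 1 - y1) (by omega) (by omega) with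
      ⟨x2, y2, hx2, hy2, hr⟩
    have hT : Tterm tab sx sy n x1 y1 = hval tab sx sy x1 y1 + fval tab sx sy x2 y2 := by
      unfold Tterm hval
      rw [hr]
    rw [hT]
    exact le_trans (hf_le_qval tab sx sy x1 y1 x2 y2 hsx hsy)
      (neon_bound tab x1 y1 x2 y2 hx1 hy1 (by omega) (by omega))

-- ===== VERDICT (by name: the statement is the Claim_ definition above) =====
theorem neon_spec : Claim_equal_neon := by
  intro tab _ _
  unfold Spec_neon
  exact le_antisymm (neon_le_alt tab) (alt_le_neon tab)
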